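-- pv_equiv track=rewrite | github.com/macoycorpuz/cit-vm-exam | cit.py | solution
-- ===== SOURCE A (Python) =====
-- def solution(totalMemory, foregroundApps, backgroundApps):
--     output = []
--     apps, appMemories = [], []
--     tempMax = 0
--
--     for fgApp in foregroundApps:
--         for bgApp in backgroundApps:
--             sumOfMemory = fgApp[1] + bgApp[1]
--             appMemories.append(sumOfMemory)
--             apps.append([fgApp[0], bgApp[0]])
--
--     if not apps:
--         return []
--
--     if min(appMemories) > totalMemory:
--         return []
--
--     for memory in appMemories:
--         if memory > tempMax and memory <= totalMemory:
--             tempMax = memory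
--
--     for app, memory in zip(tuple(apps), tuple(appMemories)):
--         if memory == tempMax:
--             output.append(app)
--
--     return output
-- ===== SOURCE B (Python) =====
-- def solution(totalMemory, foregroundApps, backgroundApps):
--     if not foregroundApps or not backgroundApps:
--         return []
--     fgs = sorted(f[1] for f in foregroundApps)
--     bgs = sorted(b[1] for b in backgroundApps)
--     if fgs[0] + bgs[0] > totalMemory:
--         return []
--     # two-pointer over the sorted memory values: for increasing fg value the
--     # matching bg pointer only moves left, so best is found in O(F+B)
--     best = 0
--     j = len(bgs) - 1
--     for x in fgs:
--         while j >= 0 and x + bgs[j] > totalMemory: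
--             j -= 1
--         if j < 0:
--             break
--         if x + bgs[j] > best:
--             best = x + bgs[j]
--     index = {}
--     for b in backgroundApps:
--         index.setdefault(b[1], []).append(b[0])
--     return [[f[0], name] for f in foregroundApps for name in index.get(best - f[1], [])]
-- ===== Notes on version B (the rewrite author's own statement) =====
-- stated objective: faster
-- what changed: B never materializes the O(F*B) pair lists: it sorts the fg and bg memory values and finds the best sum <= limit with a two-pointer sweep in O(F+B) after sorting, then enumerates the matching pairs through a dict index from bg memory to bg names in O(F+output), instead of A's three full scans over materialized F*B pair lists.
import Mathlib
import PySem

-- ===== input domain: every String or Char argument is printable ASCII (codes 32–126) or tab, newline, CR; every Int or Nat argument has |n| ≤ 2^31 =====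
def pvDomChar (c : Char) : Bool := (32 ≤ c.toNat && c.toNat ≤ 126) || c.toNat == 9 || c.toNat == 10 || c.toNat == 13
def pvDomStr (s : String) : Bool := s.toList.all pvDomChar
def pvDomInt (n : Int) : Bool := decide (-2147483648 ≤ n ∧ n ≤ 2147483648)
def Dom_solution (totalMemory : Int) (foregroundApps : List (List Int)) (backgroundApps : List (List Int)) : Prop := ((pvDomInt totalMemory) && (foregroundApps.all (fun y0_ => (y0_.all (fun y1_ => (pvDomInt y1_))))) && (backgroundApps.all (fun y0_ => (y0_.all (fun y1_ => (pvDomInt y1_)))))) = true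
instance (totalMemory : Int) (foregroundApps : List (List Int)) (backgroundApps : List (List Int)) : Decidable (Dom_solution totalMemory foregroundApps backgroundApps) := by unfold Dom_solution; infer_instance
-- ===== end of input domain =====

-- B replaces A's three scans over materialized F*B pair lists by sorting the memory values,
-- a two-pointer sweep for the best sum ≤ limit, and a dict index bg-memory -> bg-names for the
-- enumeration; equivalence of the RETURN value is proved (no argument is mutated).

-- ===== PORT A =====
-- fgApp[1] etc: in-range under Pre_solution, so pyGetD (default never read inside Pre_).
def solution (totalMemory : Int) (foregroundApps : List (List Int)) (backgroundApps : List (List Int)) : List (List Int) :=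
  let st := foregroundApps.foldl (fun acc fgApp =>
      backgroundApps.foldl (fun acc2 bgApp =>
        let sumOfMemory := PySem.List.pyGetD fgApp 1 0 + PySem.List.pyGetD bgApp 1 0
        (acc2.1 ++ [sumOfMemory],
         acc2.2 ++ [[PySem.List.pyGetD fgApp 0 0, PySem.List.pyGetD bgApp 0 0]])) acc)
    (([], []) : List Int × List (List Int))
  let appMemories := st.1
  let apps := st.2
  if apps = [] then []
  else if (PySem.List.min? appMemories (fun x => x)).getD 0 > totalMemory then []
  else
    let tempMax := appMemories.foldl (fun tempMax memory =>
      if memory > tempMax ∧ memory ≤ totalMemory then memory else tempMax) 0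
    (apps.zip appMemories).foldl (fun output p =>
      if p.2 = tempMax then output ++ [p.1] else output) []

-- ===== PORT B =====
-- the 'while j >= 0 and x + bgs[j] > totalMemory: j -= 1' inner loop of Source B
def pvDropJ (T x : Int) (bgs : List Int) (j : Int) : Int :=
  if h : 0 ≤ j ∧ x + PySem.List.pyGetD bgs j 0 > T then pvDropJ T x bgs (j - 1) else j
termination_by (j + 1).toNat
decreasing_by omega

-- the 'for x in fgs: … break …' loop of Source B (state: pointer j and running best)
def pvBestLoop (T : Int) (bgs : List Int) : List Int → Int → Int → Int
  | [], _, best => best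
  | x :: rest, j, best =>
      let j' := pvDropJ T x bgs j
      if j' < 0 then best
      else pvBestLoop T bgs rest j'
        (if x + PySem.List.pyGetD bgs j' 0 > best then x + PySem.List.pyGetD bgs j' 0 else best)

-- index.setdefault(b[1], []).append(b[0]) stores d[k] = d.get(k, []) + [b[0]]  =  Dict.modify.
def solution_alt (totalMemory : Int) (foregroundApps : List (List Int)) (backgroundApps : List (List Int)) : List (List Int) :=
  if foregroundApps = [] ∨ backgroundApps = [] then []
  else
    let fgs := PySem.List.sorted (foregroundApps.map (fun f => PySem.List.pyGetD f 1 0)) (fun x => x) false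
    let bgs := PySem.List.sorted (backgroundApps.map (fun b => PySem.List.pyGetD b 1 0)) (fun x => x) false
    if PySem.List.pyGetD fgs 0 0 + PySem.List.pyGetD bgs 0 0 > totalMemory then []
    else
      let best := pvBestLoop totalMemory bgs fgs ((bgs.length : Int) - 1) 0
      let index := backgroundApps.foldl (fun d b =>
          d.modify (PySem.List.pyGetD b 1 0) [] (fun l => l ++ [PySem.List.pyGetD b 0 0]))
        (PySem.Dict.empty : PySem.Dict Int (List Int))
      foregroundApps.flatMap (fun f =>
        (index.getD (best - PySem.List.pyGetD f 1 0) []).map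
          (fun name => [PySem.List.pyGetD f 0 0, name]))

-- ===== PRECONDITION & SPEC =====
-- A raises IndexError on fgApp[1]/bgApp[1] when both lists are nonempty and some app list has
-- fewer than 2 entries (with either side empty no element is ever indexed and A returns []).
def Pre_solution (totalMemory : Int) (foregroundApps : List (List Int)) (backgroundApps : List (List Int)) : Prop :=
  foregroundApps = [] ∨ backgroundApps = [] ∨
    ((∀ f ∈ foregroundApps, 2 ≤ f.length) ∧ (∀ b ∈ backgroundApps, 2 ≤ b.length))
instance (totalMemory : Int) (foregroundApps : List (List Int)) (backgroundApps : List (List Int)) : Decidable (Pre_solution totalMemory foregroundApps backgroundApps) := by unfold Pre_solution; infer_instance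
def pvWitness_solution : Int × List (List Int) × List (List Int) := (10, [[1, 3], [2, 8]], [[4, 5], [5, 7]])
def Spec_solution (totalMemory : Int) (foregroundApps : List (List Int)) (backgroundApps : List (List Int)) (out : List (List Int)) : Prop := out = solution_alt totalMemory foregroundApps backgroundApps
instance (totalMemory : Int) (foregroundApps : List (List Int)) (backgroundApps : List (List Int)) (out : List (List Int)) : Decidable (Spec_solution totalMemory foregroundApps backgroundApps out) := by unfold Spec_solution; infer_instance

-- ===== CLAIM (what is proved, stated in full; the proofs are below) =====
def Claim_equal_solution : Prop := ∀ (totalMemory : Int) (foregroundApps : List (List Int)) (backgroundApps : List (List Int)), Dom_solution totalMemory foregroundApps backgroundApps → Pre_solution totalMemory foregroundApps backgroundApps → Spec_solution totalMemory foregroundApps backgroundApps (solution totalMemory foregroundApps backgroundApps)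

-- ===== LEMMAS AND PROOFS =====

-- abbreviations used only by the proofs
def pvM1 (l : List Int) : Int := PySem.List.pyGetD l 1 0
def pvM0 (l : List Int) : Int := PySem.List.pyGetD l 0 0

lemma pvM1_def (l : List Int) : PySem.List.pyGetD l 1 0 = pvM1 l := rfl
lemma pvM0_def (l : List Int) : PySem.List.pyGetD l 0 0 = pvM0 l := rfl

-- pyGetD at a valid non-negative index is getElem
lemma pv_pyGetD_eq_getElem (l : List Int) (j : Int) (h0 : 0 ≤ j) (hl : j < l.length) :
    PySem.List.pyGetD l j 0 = l[j.toNat]'(by omega) := by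
  simp [PySem.List.pyGetD, PySem.List.pyGet?, PySem.List.pyIdx?, h0, hl]

-- A's materialized lists are flatMaps
lemma pv_inner_fold (bg : List (List Int)) (f : List Int) (acc : List Int × List (List Int)) :
    bg.foldl (fun acc2 b =>
        (acc2.1 ++ [pvM1 f + pvM1 b], acc2.2 ++ [[pvM0 f, pvM0 b]])) acc
      = (acc.1 ++ bg.map (fun b => pvM1 f + pvM1 b),
         acc.2 ++ bg.map (fun b => [pvM0 f, pvM0 b])) := by
  induction bg generalizing acc with
  | nil => simp
  | cons b t ih => simp [List.foldl_cons, ih]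

lemma pv_state_fold (fg bg : List (List Int)) (acc : List Int × List (List Int)) :
    fg.foldl (fun acc f => bg.foldl (fun acc2 b =>
        (acc2.1 ++ [pvM1 f + pvM1 b], acc2.2 ++ [[pvM0 f, pvM0 b]])) acc) acc
      = (acc.1 ++ fg.flatMap (fun f => bg.map (fun b => pvM1 f + pvM1 b)),
         acc.2 ++ fg.flatMap (fun f => bg.map (fun b => [pvM0 f, pvM0 b]))) := by
  induction fg generalizing acc with
  | nil => simp
  | cons f t ih =>
      rw [List.foldl_cons, pv_inner_fold, ih]
      simp [List.append_assoc]

-- min of the flattened sums is min fg + min bg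
lemma pv_min_split (fg bg : List (List Int)) (hf : fg ≠ []) (hb : bg ≠ []) :
    (PySem.List.min? (fg.flatMap (fun f => bg.map (fun b => pvM1 f + pvM1 b))) (fun x => x)).getD 0
      = (PySem.List.min? (fg.map pvM1) (fun x => x)).getD 0
        + (PySem.List.min? (bg.map pvM1) (fun x => x)).getD 0 := by
  obtain ⟨a, ha⟩ : ∃ a, PySem.List.min? (fg.map pvM1) (fun x => x) = some a := by
    cases h : PySem.List.min? (fg.map pvM1) (fun x => x) with
    | none => simp [PySem.List.min?_eq_none_iff] at h; simp [h] at hf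
    | some a => exact ⟨a, rfl⟩
  obtain ⟨c, hc⟩ : ∃ c, PySem.List.min? (bg.map pvM1) (fun x => x) = some c := by
    cases h : PySem.List.min? (bg.map pvM1) (fun x => x) with
    | none => simp [PySem.List.min?_eq_none_iff] at h; simp [h] at hb
    | some c => exact ⟨c, rfl⟩
  obtain ⟨m, hm⟩ : ∃ m, PySem.List.min? (fg.flatMap (fun f => bg.map (fun b => pvM1 f + pvM1 b))) (fun x => x) = some m := by
    cases h : PySem.List.min? (fg.flatMap (fun f => bg.map (fun b => pvM1 f + pvM1 b))) (fun x => x) with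
    | none =>
        simp [PySem.List.min?_eq_none_iff, List.flatMap_eq_nil_iff] at h
        cases fg with
        | nil => simp at hf
        | cons f t =>
            have := h f (by simp)
            simp at this
            simp [this] at hb
    | some m => exact ⟨m, rfl⟩
  have hamem := PySem.List.min?_mem ha
  have hcmem := PySem.List.min?_mem hc
  have hamin := PySem.List.min?_isMin ha
  have hcmin := PySem.List.min?_isMin hc
  have hmmem := PySem.List.min?_mem hm
  have hmmin := PySem.List.min?_isMin hm
  simp only [ha, hc, hm, Option.getD_some]
  obtain ⟨fa, hfa, hfav⟩ := List.mem_map.mp hamem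
  obtain ⟨bc, hbc, hbcv⟩ := List.mem_map.mp hcmem
  have hac : a + c ∈ fg.flatMap (fun f => bg.map (fun b => pvM1 f + pvM1 b)) := by
    refine List.mem_flatMap.mpr ⟨fa, hfa, ?_⟩
    exact List.mem_map.mpr ⟨bc, hbc, by omega⟩
  have h1 : m ≤ a + c := hmmin _ hac
  obtain ⟨fm, hfm, hmm⟩ := List.mem_flatMap.mp hmmem
  obtain ⟨bm, hbm, hmv⟩ := List.mem_map.mp hmm
  have h2 : a ≤ pvM1 fm := hamin _ (List.mem_map.mpr ⟨fm, hfm, rfl⟩)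
  have h3 : c ≤ pvM1 bm := hcmin _ (List.mem_map.mpr ⟨bm, hbm, rfl⟩)
  omega

-- the head of an ascending sort is the min
lemma pv_sorted_head_min (l : List Int) (hl : l ≠ []) :
    pvM0 (PySem.List.sorted l (fun x => x) false)
      = (PySem.List.min? l (fun x => x)).getD 0 := by
  obtain ⟨m, t, hmt⟩ : ∃ m t, PySem.List.sorted l (fun x => x) false = m :: t := by
    cases h : PySem.List.sorted l (fun x => x) false with
    | nil => rw [PySem.List.sorted_eq_nil_iff] at h; exact absurd h hl
    | cons m t => exact ⟨m, t, rfl⟩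
  obtain ⟨a, ha⟩ : ∃ a, PySem.List.min? l (fun x => x) = some a := by
    cases h : PySem.List.min? l (fun x => x) with
    | none => rw [PySem.List.min?_eq_none_iff] at h; exact absurd h hl
    | some a => exact ⟨a, rfl⟩
  have hmem : m ∈ l := (PySem.List.mem_sorted l (fun x => x) false m).mp (by rw [hmt]; simp)
  have hle : ∀ y ∈ l, m ≤ y := PySem.List.key_head_sorted_le l (fun x => x) hmt
  have h1 : a ≤ m := PySem.List.min?_isMin ha m hmem
  have h2 : m ≤ a := hle a (PySem.List.min?_mem ha)
  rw [hmt, ha]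
  simp [pvM0, PySem.List.pyGetD, PySem.List.pyGet?, PySem.List.pyIdx?]
  omega

-- A's tempMax loop is a running max over the sums that fit
lemma pv_foldA_eq_foldl_max (T : Int) (l : List Int) (a : Int) :
    l.foldl (fun m s => if m < s ∧ s ≤ T then s else m) a
      = (l.filter (fun s => decide (s ≤ T))).foldl max a := by
  induction l generalizing a with
  | nil => rfl
  | cons s t ih =>
      by_cases h : s ≤ T
      · simp only [List.foldl_cons, List.filter_cons, h, decide_true, if_pos]
        rw [ih]
        congr 1
        by_cases h2 : a < s
        · simp [h2, h, max_eq_right (le_of_lt h2)]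
        · simp [h2, h, max_eq_left (le_of_not_gt h2)]
      · have hna : ¬ (a < s ∧ s ≤ T) := by tauto
        rw [List.foldl_cons, if_neg hna, ih]
        congr 1
        simp [List.filter_cons, h]

lemma pv_foldl_max_spec (l : List Int) (a : Int) :
    (l.foldl max a = a ∨ l.foldl max a ∈ l) ∧ a ≤ l.foldl max a ∧ ∀ x ∈ l, x ≤ l.foldl max a := by
  induction l generalizing a with
  | nil => simp
  | cons s t ih =>
      obtain ⟨h1, h2, h3⟩ := ih (max a s)
      simp only [List.foldl_cons]
      refine ⟨?_, le_trans (le_max_left a s) h2, ?_⟩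
      · rcases h1 with h | h
        · rcases max_choice a s with hm | hm
          · exact Or.inl (by rw [h, hm])
          · exact Or.inr (by rw [h, hm]; simp)
        · exact Or.inr (List.mem_cons_of_mem _ h)
      · intro x hx
        rcases List.mem_cons.mp hx with rfl | hx
        · exact le_trans (le_max_right a x) h2
        · exact h3 x hx

-- the "best" value both programs compute: max of 0 and all pair sums ≤ T
def pvIsBest (T : Int) (F B : List Int) (r : Int) : Prop :=
  (r = 0 ∨ ((∃ x ∈ F, ∃ y ∈ B, r = x + y) ∧ r ≤ T)) ∧ 0 ≤ r ∧
    ∀ x ∈ F, ∀ y ∈ B, x + y ≤ T → x + y ≤ r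

lemma pvIsBest_unique {T : Int} {F B : List Int} {r r' : Int}
    (h : pvIsBest T F B r) (h' : pvIsBest T F B r') : r = r' := by
  obtain ⟨hc, h0, hmax⟩ := h
  obtain ⟨hc', h0', hmax'⟩ := h'
  rcases hc with rfl | ⟨⟨x, hx, y, hy, rfl⟩, hT⟩ <;>
    rcases hc' with rfl | ⟨⟨x', hx', y', hy', rfl⟩, hT'⟩
  · rfl
  · have := hmax x' hx' y' hy' hT'; omega
  · have := hmax' x hx y hy hT; omega
  · have := hmax x' hx' y' hy' hT'
    have := hmax' x hx y hy hT
    omega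

-- membership transfer through sorting
lemma pvIsBest_perm {T : Int} {F B F' B' : List Int} (hF : ∀ x, x ∈ F ↔ x ∈ F')
    (hB : ∀ y, y ∈ B ↔ y ∈ B') {r : Int} (h : pvIsBest T F B r) : pvIsBest T F' B' r := by
  obtain ⟨hc, h0, hmax⟩ := h
  refine ⟨?_, h0, fun x hx y hy => hmax x ((hF x).mpr hx) y ((hB y).mpr hy)⟩
  rcases hc with rfl | ⟨⟨x, hx, y, hy, rfl⟩, hT⟩
  · exact Or.inl rfl
  · exact Or.inr ⟨⟨x, (hF x).mp hx, y, (hB y).mp hy, rfl⟩, hT⟩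

-- A's value is pvIsBest
lemma pv_A_isBest (T : Int) (fg bg : List (List Int)) :
    pvIsBest T (fg.map pvM1) (bg.map pvM1)
      ((fg.flatMap (fun f => bg.map (fun b => pvM1 f + pvM1 b))).foldl
        (fun m s => if m < s ∧ s ≤ T then s else m) 0) := by
  rw [pv_foldA_eq_foldl_max]
  set l := (fg.flatMap (fun f => bg.map (fun b => pvM1 f + pvM1 b))).filter
    (fun s => decide (s ≤ T)) with hl
  obtain ⟨h1, h2, h3⟩ := pv_foldl_max_spec l 0
  refine ⟨?_, h2, ?_⟩
  · rcases h1 with h | h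
    · exact Or.inl h
    · rw [hl, List.mem_filter] at h
      obtain ⟨hm, hT⟩ := h
      obtain ⟨f, hf, hm2⟩ := List.mem_flatMap.mp hm
      obtain ⟨b, hb, hbe⟩ := List.mem_map.mp hm2
      exact Or.inr ⟨⟨pvM1 f, List.mem_map.mpr ⟨f, hf, rfl⟩, pvM1 b,
        List.mem_map.mpr ⟨b, hb, rfl⟩, hbe.symm⟩, by simpa using hT⟩
  · intro x hx y hy hT
    obtain ⟨f, hf, rfl⟩ := List.mem_map.mp hx
    obtain ⟨b, hb, rfl⟩ := List.mem_map.mp hy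
    refine h3 _ ?_
    rw [hl, List.mem_filter]
    exact ⟨List.mem_flatMap.mpr ⟨f, hf, List.mem_map.mpr ⟨b, hb, rfl⟩⟩, by simpa using hT⟩

-- pvDropJ postcondition
lemma pv_dropJ_spec (T x : Int) (bgs : List Int) (j : Int) :
    pvDropJ T x bgs j ≤ j ∧
    (0 ≤ pvDropJ T x bgs j → x + PySem.List.pyGetD bgs (pvDropJ T x bgs j) 0 ≤ T) ∧
    (0 ≤ j → -1 ≤ pvDropJ T x bgs j) ∧
    ∀ k, pvDropJ T x bgs j < k → k ≤ j → x + PySem.List.pyGetD bgs k 0 > T := by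
  induction j using pvDropJ.induct (T := T) (x := x) (bgs := bgs) with
  | case1 j h ih =>
      obtain ⟨i1, i2, i3, i4⟩ := ih
      rw [pvDropJ, dif_pos h]
      have hlow : -1 ≤ pvDropJ T x bgs (j - 1) := by
        by_cases hj : 0 ≤ j - 1
        · have := i3 hj; omega
        · have he : pvDropJ T x bgs (j - 1) = j - 1 := by
            rw [pvDropJ, dif_neg (fun hc => hj hc.1)]
          rcases h with ⟨h0, _⟩
          omega
      refine ⟨by omega, i2, fun _ => hlow, ?_⟩
      intro k hk1 hk2
      by_cases hkj : k ≤ j - 1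
      · exact i4 k hk1 hkj
      · have hkeq : k = j := by omega
        subst hkeq; exact h.2
  | case2 j h =>
      rw [pvDropJ, dif_neg h]
      refine ⟨le_refl _, fun h0 => ?_, fun h0 => by omega, fun k hk1 hk2 => by omega⟩
      by_contra hgt
      exact h ⟨h0, by omega⟩

-- two-pointer main loop invariant
lemma pv_bestLoop_spec (T : Int) (bgs : List Int) (hbgs : bgs.Pairwise (· ≤ ·)) :
    ∀ (rem : List Int) (j best : Int), rem.Pairwise (· ≤ ·) →
      -1 ≤ j → j < (bgs.length : Int) →
      (∀ x' ∈ rem, ∀ k : Int, j < k → k < (bgs.length : Int) → x' + PySem.List.pyGetD bgs k 0 > T) →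
      (pvBestLoop T bgs rem j best = best ∨
        ((∃ x ∈ rem, ∃ y ∈ bgs, pvBestLoop T bgs rem j best = x + y) ∧ pvBestLoop T bgs rem j best ≤ T)) ∧
      best ≤ pvBestLoop T bgs rem j best ∧
      ∀ x ∈ rem, ∀ y ∈ bgs, x + y ≤ T → x + y ≤ pvBestLoop T bgs rem j best := by
  intro rem
  induction rem with
  | nil => intro j best _ _ _ _; simp [pvBestLoop]
  | cons x rest ih =>
      intro j best hsorted hj1 hj2 hinv
      have hgetmono : ∀ p q : Int, 0 ≤ p → p ≤ q → q < (bgs.length : Int) →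
          PySem.List.pyGetD bgs p 0 ≤ PySem.List.pyGetD bgs q 0 := by
        intro p q hp hpq hq
        rw [pv_pyGetD_eq_getElem bgs p hp (by omega), pv_pyGetD_eq_getElem bgs q (by omega) hq]
        rcases eq_or_lt_of_le hpq with rfl | hlt
        · exact le_refl _
        · exact (List.pairwise_iff_getElem.mp hbgs) p.toNat q.toNat (by omega) (by omega) (by omega)
      have hxle : ∀ x' ∈ rest, x ≤ x' := fun x' hx' => (List.pairwise_cons.mp hsorted).1 x' hx'
      obtain ⟨d1, d2, d3, d4⟩ := pv_dropJ_spec T x bgs j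
      set j' := pvDropJ T x bgs j with hj'
      have hstep : pvBestLoop T bgs (x :: rest) j best
          = if j' < 0 then best
            else pvBestLoop T bgs rest j'
              (if x + PySem.List.pyGetD bgs j' 0 > best
               then x + PySem.List.pyGetD bgs j' 0 else best) := rfl
      by_cases hneg : j' < 0
      · -- break: every remaining pair exceeds T
        rw [hstep, if_pos hneg]
        refine ⟨Or.inl rfl, le_refl _, ?_⟩
        intro x' hx' y hy hT
        exfalso
        obtain ⟨kn, hkn, rfl⟩ := List.mem_iff_getElem.mp hy
        have hxx' : x ≤ x' := by
          rcases List.mem_cons.mp hx' with rfl | h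
          · exact le_refl _
          · exact hxle _ h
        have hget : bgs[kn] = PySem.List.pyGetD bgs (kn : Int) 0 := by
          rw [pv_pyGetD_eq_getElem bgs kn (by omega) (by exact_mod_cast hkn)]
          simp
        by_cases hk : (kn : Int) ≤ j
        · have := d4 (kn : Int) (by omega) hk
          rw [← hget] at this; omega
        · have := hinv x' hx' (kn : Int) (by omega) (by exact_mod_cast hkn)
          rw [← hget] at this; omega
      · -- j' ≥ 0: take candidate x + bgs[j'], recurse
        have hge : 0 ≤ j' := by omega
        rw [hstep, if_neg hneg]
        set v := PySem.List.pyGetD bgs j' 0 with hv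
        set best' := if x + v > best then x + v else best with hbest'
        have hvT : x + v ≤ T := d2 hge
        have hvmem : v ∈ bgs := by
          rw [hv, pv_pyGetD_eq_getElem bgs j' hge (by omega)]
          exact List.getElem_mem _
        have hinv' : ∀ x' ∈ rest, ∀ k : Int, j' < k → k < (bgs.length : Int) →
            x' + PySem.List.pyGetD bgs k 0 > T := by
          intro x' hx' k hk1 hk2
          have hxx' : x ≤ x' := hxle _ hx'
          by_cases hk : k ≤ j
          · have := d4 k hk1 hk; omega
          · exact hinv x' (List.mem_cons_of_mem _ hx') k (by omega) hk2
        obtain ⟨r1, r2, r3⟩ := ih j' best' (List.pairwise_cons.mp hsorted).2 (by omega) (by omega) hinv'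
        refine ⟨?_, ?_, ?_⟩
        · rcases r1 with h | ⟨⟨x', hx', y, hy, hval⟩, hT⟩
          · rw [h, hbest']
            by_cases hb : x + v > best
            · rw [if_pos hb]
              exact Or.inr ⟨⟨x, by simp, v, hvmem, rfl⟩, hvT⟩
            · rw [if_neg hb]; exact Or.inl rfl
          · exact Or.inr ⟨⟨x', List.mem_cons_of_mem _ hx', y, hy, hval⟩, hT⟩
        · refine le_trans ?_ r2
          rw [hbest']; split <;> omega
        · intro x' hx' y hy hT
          rcases List.mem_cons.mp hx' with rfl | hmem
          · -- head: x' = x; x + y ≤ x + v ≤ best'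
            obtain ⟨kn, hkn, rfl⟩ := List.mem_iff_getElem.mp hy
            have hget : bgs[kn] = PySem.List.pyGetD bgs (kn : Int) 0 := by
              rw [pv_pyGetD_eq_getElem bgs kn (by omega) (by exact_mod_cast hkn)]; simp
            have hyv : bgs[kn] ≤ v := by
              by_cases hk : (kn : Int) ≤ j'
              · rw [hget, hv]
                exact hgetmono (kn : Int) j' (by omega) hk (by omega)
              · exfalso
                by_cases hkj : (kn : Int) ≤ j
                · have := d4 (kn : Int) (by omega) hkj
                  rw [← hget] at this; omega
                · have := hinv x' (by simp) (kn : Int) (by omega) (by exact_mod_cast hkn)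
                  rw [← hget] at this; omega
            have hb' : x' + v ≤ best' := by rw [hbest']; split <;> omega
            calc x' + bgs[kn] ≤ x' + v := by omega
              _ ≤ best' := hb'
              _ ≤ _ := r2
          · exact r3 x' hmem y hy hT

-- B's best equals A's tempMax
lemma pv_best_eq (T : Int) (fg bg : List (List Int)) (hf : fg ≠ []) (hb : bg ≠ []) :
    (fg.flatMap (fun f => bg.map (fun b => pvM1 f + pvM1 b))).foldl
        (fun m s => if m < s ∧ s ≤ T then s else m) 0
      = pvBestLoop T (PySem.List.sorted (bg.map pvM1) (fun x => x) false)
          (PySem.List.sorted (fg.map pvM1) (fun x => x) false)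
          (((PySem.List.sorted (bg.map pvM1) (fun x => x) false).length : Int) - 1) 0 := by
  set fgs := PySem.List.sorted (fg.map pvM1) (fun x => x) false with hfgs
  set bgs := PySem.List.sorted (bg.map pvM1) (fun x => x) false with hbgs
  have hsB : bgs.Pairwise (· ≤ ·) := PySem.List.sorted_pairwise (bg.map pvM1) (fun x => x)
  have hsF : fgs.Pairwise (· ≤ ·) := PySem.List.sorted_pairwise (fg.map pvM1) (fun x => x)
  obtain ⟨b1, b2, b3⟩ := pv_bestLoop_spec T bgs hsB fgs ((bgs.length : Int) - 1) 0 hsF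
    (by omega) (by omega) (by intro x' _ k hk1 hk2; omega)
  have hBbest : pvIsBest T (fg.map pvM1) (bg.map pvM1)
      (pvBestLoop T bgs fgs ((bgs.length : Int) - 1) 0) := by
    refine pvIsBest_perm (F := fgs) (B := bgs)
      (fun x => PySem.List.mem_sorted (fg.map pvM1) (fun y => y) false x)
      (fun y => PySem.List.mem_sorted (bg.map pvM1) (fun z => z) false y) ⟨?_, b2, b3⟩
    rcases b1 with h | h
    · exact Or.inl h
    · exact Or.inr h
  exact pvIsBest_unique (pv_A_isBest T fg bg) hBbest

-- zip of the two parallel flatMaps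
lemma pv_zip_flat (fg bg : List (List Int)) :
    (fg.flatMap (fun f => bg.map (fun b => [pvM0 f, pvM0 b]))).zip
      (fg.flatMap (fun f => bg.map (fun b => pvM1 f + pvM1 b)))
      = fg.flatMap (fun f => bg.map (fun b => ([pvM0 f, pvM0 b], pvM1 f + pvM1 b))) := by
  induction fg with
  | nil => simp
  | cons f t ih =>
      simp only [List.flatMap_cons]
      rw [List.zip_append (by simp)]
      simp [ih, List.zip_map']

-- B's dict index reads back the bg names whose memory equals the key
lemma pv_index_getD (bg : List (List Int)) (k : Int) :
    ((bg.foldl (fun d b => d.modify (pvM1 b) [] (fun l => l ++ [pvM0 b]))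
        (PySem.Dict.empty : PySem.Dict Int (List Int))).getD k [])
      = ((bg.filter (fun b => pvM1 b == k)).map pvM0) := by
  have h := PySem.Dict.getD_foldl_modify_append
      (l := bg.map (fun b => (pvM1 b, pvM0 b))) (d := (PySem.Dict.empty : PySem.Dict Int (List Int))) (c := k)
  rw [List.foldl_map] at h
  simp only [h, PySem.Dict.getD_empty, List.nil_append, List.filter_map, List.map_map]
  rfl

-- ===== VERDICT (by name: the statement is the Claim_ definition above) =====
theorem solution_spec : Claim_equal_solution := by
  intro T fg bg _hdom hpre
  show solution T fg bg = solution_alt T fg bg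
  unfold solution solution_alt
  simp only [pvM1_def, pvM0_def]
  rcases hpre with hfg | hbg | hlen
  · subst hfg; simp
  · subst hbg; simp
  by_cases hfg : fg = []
  · subst hfg; simp
  by_cases hbg : bg = []
  · subst hbg; simp
  have hne : ¬ (fg = [] ∨ bg = []) := by tauto
  have happs : fg.flatMap (fun f => bg.map (fun b => [pvM0 f, pvM0 b])) ≠ [] := by
    simp only [ne_eq, List.flatMap_eq_nil_iff]
    intro h
    cases fg with
    | nil => exact hfg rfl
    | cons f t =>
        have := h f (by simp)
        simp at this
        exact hbg this
  simp only [pv_state_fold, List.nil_append]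
  rw [if_neg happs, if_neg hne, pv_min_split fg bg hfg hbg,
      pv_sorted_head_min (fg.map pvM1) (by simpa using hfg),
      pv_sorted_head_min (bg.map pvM1) (by simpa using hbg)]
  by_cases hmin : (PySem.List.min? (fg.map pvM1) (fun x => x)).getD 0
      + (PySem.List.min? (bg.map pvM1) (fun x => x)).getD 0 > T
  · rw [if_pos hmin, if_pos hmin]
  rw [if_neg hmin, if_neg hmin, pv_zip_flat]
  rw [show (fun (tempMax memory : Int) => if memory > tempMax ∧ memory ≤ T then memory else tempMax)
        = (fun m s => if m < s ∧ s ≤ T then s else m) from rfl]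
  rw [pv_best_eq T fg bg hfg hbg]
  simp only [PySem.List.foldl_append_ite]
  set best := pvBestLoop T (PySem.List.sorted (bg.map pvM1) (fun x => x) false)
      (PySem.List.sorted (fg.map pvM1) (fun x => x) false)
      (((PySem.List.sorted (bg.map pvM1) (fun x => x) false).length : Int) - 1) 0 with hbest
  simp only [List.nil_append, List.filter_flatMap, List.map_flatMap]
  apply List.flatMap_congr
  intro f _
  rw [pv_index_getD]
  simp only [List.filter_map, List.map_map]
  rw [List.filter_congr (fun b _ => show ((fun q : List Int × Int => decide (q.2 = best)) ∘
        (fun b => ([pvM0 f, pvM0 b], pvM1 f + pvM1 b))) b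
      = (fun b => pvM1 b == best - pvM1 f) b from by
    simp only [Function.comp_apply]
    rw [show (pvM1 b == best - pvM1 f) = decide (pvM1 b = best - pvM1 f) from rfl]
    exact decide_eq_decide.mpr (by omega))]
  rfl
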